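-- pv_equiv track=rewrite | github.com/Amar585/Task_Manager | auth_app/views.py | is_valid_email_domain
-- ===== SOURCE A (Python) =====
-- ALLOWED_EMAIL_DOMAINS = [
--     # Popular email providers
--     'gmail.com', 'yahoo.com', 'outlook.com', 'hotmail.com', 'aol.com', 'icloud.com', 'protonmail.com',
--     'mail.com', 'zoho.com', 'yandex.com', 'gmx.com',
--     # Major tech/business domains that often have email
--     'microsoft.com', 'apple.com', 'amazon.com', 'google.com',
--     # Education domains
--     'edu', 'ac.uk', 'edu.au',
--     # Government domains
--     'gov', 'gov.uk', 'gov.au',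
--     # Popular country domains
--     'co.uk', 'co.jp', 'com.au'
-- ]
--
-- def is_valid_email_domain(email):
--     """
--     Validates if the email domain is in our list of legitimate providers.
--     Using a whitelist-only approach.
--
--     Returns:
--     - (bool, str): Tuple of (is_valid, error_message)
--     """
--     if not email or '@' not in email:
--         return False, "Invalid email format"
--
--     # Extract domain from email
--     domain = email.split('@')[-1].lower()
--
--     # Check if domain is in our whitelist of allowed domains
--     if domain in ALLOWED_EMAIL_DOMAINS:
--         return True, ""
--
--     # Check if domain ends with any of our legitimate TLDs
--     for allowed_domain in ALLOWED_EMAIL_DOMAINS: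
--         if domain.endswith('.' + allowed_domain):
--             return True, ""
--
--     # Not in whitelist - reject
--     return False, "Please use an email from a recognized email provider (like Gmail, Yahoo, Outlook, etc.)"
-- ===== SOURCE B (Python) =====
-- ALLOWED_EMAIL_DOMAINS = [
--     'gmail.com', 'yahoo.com', 'outlook.com', 'hotmail.com', 'aol.com', 'icloud.com', 'protonmail.com',
--     'mail.com', 'zoho.com', 'yandex.com', 'gmx.com',
--     'microsoft.com', 'apple.com', 'amazon.com', 'google.com',
--     'edu', 'ac.uk', 'edu.au',
--     'gov', 'gov.uk', 'gov.au',
--     'co.uk', 'co.jp', 'com.au'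
-- ]
--
-- ALLOWED_SET = frozenset(ALLOWED_EMAIL_DOMAINS)
--
--
-- def is_valid_email_domain(email):
--     """Whitelist check driven by the domain's own dotted suffixes against a set."""
--     if not email or '@' not in email:
--         return False, "Invalid email format"
--
--     suffix = email.split('@')[-1].lower()
--     while True:
--         if suffix in ALLOWED_SET:
--             return True, ""
--         dot = suffix.find('.')
--         if dot == -1:
--             return False, "Please use an email from a recognized email provider (like Gmail, Yahoo, Outlook, etc.)"
--         suffix = suffix[dot + 1:]
-- ===== Notes on version B (the rewrite author's own statement) =====
-- stated objective: idiomatic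
-- what changed: Instead of scanning the whole whitelist with an endswith test per entry after a list-membership test, B walks the domain's own dotted suffixes (repeatedly dropping the leading label up to the first dot) and checks each against a frozenset of the whitelist built once, stopping at the first hit.
import Mathlib
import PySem

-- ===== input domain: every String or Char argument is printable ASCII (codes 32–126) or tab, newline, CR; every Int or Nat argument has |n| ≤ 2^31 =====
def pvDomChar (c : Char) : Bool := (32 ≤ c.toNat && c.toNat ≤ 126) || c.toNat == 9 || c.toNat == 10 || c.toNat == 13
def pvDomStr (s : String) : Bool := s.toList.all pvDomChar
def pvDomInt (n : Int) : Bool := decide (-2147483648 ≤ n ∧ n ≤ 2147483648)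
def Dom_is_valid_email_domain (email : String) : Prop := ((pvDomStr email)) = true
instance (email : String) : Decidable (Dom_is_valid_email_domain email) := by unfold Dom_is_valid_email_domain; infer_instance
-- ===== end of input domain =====

-- B replaces A's whitelist scan with-endswith by a loop over the domain's own dotted
-- suffixes checked against a set built once (objective: idiomatic/alternative).

-- ALLOWED_EMAIL_DOMAINS (module constant used by both Pythons)
def pvAllowed : List (List Char) :=
  ["gmail.com".toList, "yahoo.com".toList, "outlook.com".toList, "hotmail.com".toList,
   "aol.com".toList, "icloud.com".toList, "protonmail.com".toList,
   "mail.com".toList, "zoho.com".toList, "yandex.com".toList, "gmx.com".toList,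
   "microsoft.com".toList, "apple.com".toList, "amazon.com".toList, "google.com".toList,
   "edu".toList, "ac.uk".toList, "edu.au".toList,
   "gov".toList, "gov.uk".toList, "gov.au".toList,
   "co.uk".toList, "co.jp".toList, "com.au".toList]

-- ===== PORT A =====
def is_valid_email_domain (email : String) : Bool × String :=
  let cs := email.toList
  if cs.isEmpty || !(PySem.Chars.isIn ['@'] cs) then (false, "Invalid email format")
  else
    -- domain = email.split('@')[-1].lower()
    let domain := PySem.Chars.lower (((PySem.Chars.splitOn cs ['@']).getLast?).getD [])
    if pvAllowed.contains domain then (true, "")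
    else if pvAllowed.any (fun a => PySem.Chars.endswith domain ('.' :: a)) then (true, "")
    else (false, "Please use an email from a recognized email provider (like Gmail, Yahoo, Outlook, etc.)")

-- ===== PORT B =====
-- ALLOWED_SET = frozenset(ALLOWED_EMAIL_DOMAINS)
def pvAllowedSet : PySem.Set (List Char) := PySem.Set.ofList pvAllowed

-- `suffix.find('.')` followed by `suffix[dot+1:]`: the tail after the FIRST '.', none if no '.'
def pvDotTail : List Char → Option (List Char)
  | [] => none
  | c :: cs => if c = '.' then some cs else pvDotTail cs

theorem pvDotTail_length_lt : ∀ (s r : List Char), pvDotTail s = some r → r.length < s.length := by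
  intro s
  induction s with
  | nil => intro r h; simp [pvDotTail] at h
  | cons c cs ih =>
    intro r h
    by_cases hc : c = '.'
    · simp [pvDotTail, hc] at h; subst h; simp
    · simp [pvDotTail, hc] at h
      exact Nat.lt_trans (ih r h) (by simp)

-- the `while True` loop of B
def pvSufLoop (s : List Char) : Bool :=
  if PySem.Set.contains pvAllowedSet s then true
  else
    match h : pvDotTail s with
    | none => false
    | some r => pvSufLoop r
termination_by s.length
decreasing_by exact pvDotTail_length_lt s r h

def is_valid_email_domain_alt (email : String) : Bool × String :=
  let cs := email.toList
  if cs.isEmpty || !(PySem.Chars.isIn ['@'] cs) then (false, "Invalid email format")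
  else
    let suffix := PySem.Chars.lower (((PySem.Chars.splitOn cs ['@']).getLast?).getD [])
    if pvSufLoop suffix then (true, "")
    else (false, "Please use an email from a recognized email provider (like Gmail, Yahoo, Outlook, etc.)")

-- ===== PRECONDITION & SPEC =====
def Spec_is_valid_email_domain (email : String) (out : Bool × String) : Prop := out = is_valid_email_domain_alt email
instance (email : String) (out : Bool × String) : Decidable (Spec_is_valid_email_domain email out) := by unfold Spec_is_valid_email_domain; infer_instance

-- ===== CLAIM (what is proved, stated in full; the proofs are below) =====
def Claim_equal_is_valid_email_domain : Prop := ∀ (email : String), Dom_is_valid_email_domain email → Spec_is_valid_email_domain email (is_valid_email_domain email)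

-- ===== LEMMAS AND PROOFS =====

-- membership in the set built from the whitelist is membership in the whitelist
theorem pv_setmem_iff (x : List Char) : PySem.Set.contains pvAllowedSet x = true ↔ x ∈ pvAllowed := by
  rw [pvAllowedSet, PySem.Set.contains_iff (PySem.Set.ofList pvAllowed) x]
  exact PySem.Set.mem_ofList pvAllowed x

-- '.'++a is a suffix of s iff, after the first '.', a is s's remaining tail or '.'++a is still a suffix
theorem pv_endswith_dot_iff : ∀ (s a : List Char),
    ('.' :: a) <:+ s ↔ ∃ r, pvDotTail s = some r ∧ (a = r ∨ ('.' :: a) <:+ r) := by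
  intro s a
  induction s with
  | nil => simp [pvDotTail]
  | cons c cs ih =>
    by_cases hc : c = '.'
    · subst hc
      have hd : pvDotTail ('.' :: cs) = some cs := by simp [pvDotTail]
      rw [hd, List.suffix_cons_iff]
      constructor
      · rintro (h | h)
        · exact ⟨cs, rfl, Or.inl (by injection h)⟩
        · exact ⟨cs, rfl, Or.inr h⟩
      · rintro ⟨r, hr, h⟩
        injection hr with hr; subst hr
        rcases h with h | h
        · exact Or.inl (by rw [h])
        · exact Or.inr h
    · simp only [pvDotTail, if_neg hc, List.suffix_cons_iff]
      rw [← ih]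
      constructor
      · rintro (h | h)
        · exact absurd (by injection h with h _; exact h.symm) hc
        · exact h
      · exact Or.inr

theorem pvSufLoop_iff : ∀ (s : List Char),
    pvSufLoop s = true ↔ (s ∈ pvAllowed ∨ ∃ a ∈ pvAllowed, ('.' :: a) <:+ s) := by
  intro s
  induction s using pvSufLoop.induct with
  | case1 s hmem =>
    rw [pvSufLoop, if_pos hmem]
    simp only [true_iff]
    exact Or.inl ((pv_setmem_iff s).mp hmem)
  | case2 s hmem hnone =>
    rw [pvSufLoop, if_neg hmem, hnone]
    constructor
    · intro h; exact absurd h (by simp)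
    · rintro (h | ⟨a, _, hsuf⟩)
      · exact absurd ((pv_setmem_iff s).mpr h) hmem
      · rcases (pv_endswith_dot_iff s a).mp hsuf with ⟨r, hr, _⟩
        rw [hnone] at hr; exact absurd hr (by simp)
  | case3 s hmem r hr ih =>
    rw [pvSufLoop, if_neg hmem, hr, ih]
    have hs : s ∉ pvAllowed := fun h => hmem ((pv_setmem_iff s).mpr h)
    constructor
    · rintro (h | ⟨a, ha, hsuf⟩)
      · exact Or.inr ⟨r, h, (pv_endswith_dot_iff s r).mpr ⟨r, hr, Or.inl rfl⟩⟩
      · exact Or.inr ⟨a, ha, (pv_endswith_dot_iff s a).mpr ⟨r, hr, Or.inr hsuf⟩⟩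
    · rintro (h | ⟨a, ha, hsuf⟩)
      · exact absurd h hs
      · rcases (pv_endswith_dot_iff s a).mp hsuf with ⟨r', hr', h'⟩
        rw [hr] at hr'; injection hr' with hr'; subst hr'
        rcases h' with h' | h'
        · exact Or.inl (h' ▸ ha)
        · exact Or.inr ⟨a, ha, h'⟩

-- ===== VERDICT (by name: the statement is the Claim_ definition above) =====
theorem is_valid_email_domain_spec : Claim_equal_is_valid_email_domain := by
  intro email _
  unfold Spec_is_valid_email_domain is_valid_email_domain is_valid_email_domain_alt
  by_cases hg : (email.toList.isEmpty || !(PySem.Chars.isIn ['@'] email.toList)) = true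
  · simp only [hg, if_true]
  · simp only [hg]
    set d := PySem.Chars.lower (((PySem.Chars.splitOn email.toList ['@']).getLast?).getD []) with hd
    by_cases h1 : pvAllowed.contains d = true
    · have hl : pvSufLoop d = true := (pvSufLoop_iff d).mpr (Or.inl (by simpa using h1))
      have h1' : d ∈ pvAllowed := by simpa using h1
      simp [h1', hl]
    · by_cases h2 : pvAllowed.any (fun a => PySem.Chars.endswith d ('.' :: a)) = true
      · obtain ⟨a, ha, he⟩ := List.any_eq_true.mp h2
        have hl : pvSufLoop d = true :=
          (pvSufLoop_iff d).mpr (Or.inr ⟨a, ha, (PySem.Chars.endswith_iff d ('.' :: a)).mp he⟩)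
        simp [h2, hl]
      · have hl : pvSufLoop d = false := by
          rw [Bool.eq_false_iff]
          intro h
          rcases (pvSufLoop_iff d).mp h with h | ⟨a, ha, hs⟩
          · exact h1 (by simpa using h)
          · exact h2 (List.any_eq_true.mpr ⟨a, ha, (PySem.Chars.endswith_iff d ('.' :: a)).mpr hs⟩)
        have h1' : d ∉ pvAllowed := by simpa using h1
        simp [h1', h2, hl]
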